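-- pv_equiv track=rewrite | github.com/Adinopo/1.semester_PROG1 | Týždeň 6/Ulohy 1-11.py | fibonacci_index_a
-- ===== SOURCE A (Python) =====
-- def fibonacci_index_a(x):
--     n = 0
--     while True:
--         if fibonacci(n) == x:
--             return n
--         if fibonacci(n) > x:
--             return -1
--         n += 1
--
-- def fibonacci(n):
--     if n == 0:
--         return 0
--     elif n == 1:
--         return 1
--     else:
--         return fibonacci(n-1) + fibonacci(n-2)
-- ===== SOURCE B (Python) =====
-- def fibonacci_index_a(x):
--     a, b, n = 0, 1, 0
--     while a < x:
--         a, b = b, a + b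
--         n += 1
--     return n if a == x else -1
-- ===== Notes on version B (the rewrite author's own statement) =====
-- stated objective: faster
-- what changed: Replaces the outer search that recomputes fibonacci(n) by naive exponential double recursion at every step with a single pass carrying the running Fibonacci pair (a, b).
import Mathlib
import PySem

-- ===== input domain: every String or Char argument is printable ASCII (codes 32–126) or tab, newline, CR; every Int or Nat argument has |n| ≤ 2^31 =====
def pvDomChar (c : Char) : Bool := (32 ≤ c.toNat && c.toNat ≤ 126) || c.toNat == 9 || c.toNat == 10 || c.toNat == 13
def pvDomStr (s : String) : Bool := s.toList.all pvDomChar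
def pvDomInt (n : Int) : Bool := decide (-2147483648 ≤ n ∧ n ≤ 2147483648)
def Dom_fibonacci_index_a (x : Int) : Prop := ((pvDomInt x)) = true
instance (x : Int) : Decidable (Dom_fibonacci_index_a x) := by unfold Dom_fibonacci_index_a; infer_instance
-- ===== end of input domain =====

-- B replaces A's per-step naive exponential recursive fibonacci with one pass
-- carrying the running Fibonacci pair (objective: faster).
-- Both loops are totalised with fuel 64: for |x| ≤ 2^31 (the domain) the Python
-- loops stop at n ≤ 47 (fib 47 > 2^31), so the fuel guard is never reached there.

-- ===== PORT A =====
def pvFibA : Nat → Int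
  | 0 => 0
  | 1 => 1
  | n + 2 => pvFibA (n + 1) + pvFibA n

def pvLoopA : Nat → Nat → Int → Int
  | 0, _, _ => -1        -- fuel exhausted (unreachable on the stated domain)
  | f + 1, n, x =>
      if pvFibA n = x then (n : Int)
      else if pvFibA n > x then -1
      else pvLoopA f (n + 1) x

def fibonacci_index_a (x : Int) : Int := pvLoopA 64 0 x

-- ===== PORT B =====
def pvLoopB : Nat → Int → Int → Nat → Int → Int
  | 0, _, _, _, _ => -1  -- fuel exhausted (unreachable on the stated domain)
  | f + 1, a, b, n, x =>
      if a < x then pvLoopB f b (a + b) (n + 1) x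
      else if a = x then (n : Int) else -1

def fibonacci_index_a_alt (x : Int) : Int := pvLoopB 64 0 1 0 x

-- ===== PRECONDITION & SPEC =====
def Spec_fibonacci_index_a (x : Int) (out : Int) : Prop := out = fibonacci_index_a_alt x
instance (x : Int) (out : Int) : Decidable (Spec_fibonacci_index_a x out) := by unfold Spec_fibonacci_index_a; infer_instance

-- ===== CLAIM (what is proved, stated in full; the proofs are below) =====
def Claim_equal_fibonacci_index_a : Prop := ∀ (x : Int), Dom_fibonacci_index_a x → Spec_fibonacci_index_a x (fibonacci_index_a x)

-- ===== LEMMAS AND PROOFS =====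

-- B's running pair at step n is exactly (fib n, fib (n+1)); with equal fuel the
-- two loops branch identically and return the same value.
theorem pvLoopA_eq_pvLoopB : ∀ (f n : Nat) (x : Int),
    pvLoopA f n x = pvLoopB f (pvFibA n) (pvFibA (n + 1)) n x := by
  intro f
  induction f with
  | zero => intro n x; rfl
  | succ f ih =>
    intro n x
    simp only [pvLoopA, pvLoopB]
    rcases lt_trichotomy (pvFibA n) x with h | h | h
    · rw [if_neg (by omega), if_neg (by omega), if_pos h, ih (n + 1) x]
      have : pvFibA n + pvFibA (n + 1) = pvFibA (n + 2) := by
        simp [pvFibA]; ring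
      rw [this]
    · rw [if_pos h, if_neg (by omega), if_pos h]
    · rw [if_neg (by omega), if_pos h, if_neg (by omega), if_neg (by omega)]

-- ===== VERDICT (by name: the statement is the Claim_ definition above) =====
theorem fibonacci_index_a_spec : Claim_equal_fibonacci_index_a := by
  intro x _
  show fibonacci_index_a x = fibonacci_index_a_alt x
  simpa [pvFibA] using pvLoopA_eq_pvLoopB 64 0 x
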